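-- pv_equiv track=rewrite | github.com/UICHCC/uic-course-description-parser | extract.py | get_course_pre
-- ===== SOURCE A (Python) =====
-- def get_course_pre(course_raw):
--     buffer = list()
--     start = 0
--     for i in course_raw:
--         if "Pre-requisite(s):" in i:
--             start = 1
--         if "Course Description:" in i or "Course  Description" in i or "Description:" in i or "Course Description" in i:
--             start = 0
--             break
--         if start:
--             if "Pre-requisite(s):" in i:
--                 buffer.append(i.replace("Pre-requisite(s):", ""))
--             else:
--                 buffer.append(i)
--     return "".join(buffer)
-- ===== SOURCE B (Python) =====
-- def _desc(line):
--     return ("Course Description:" in line or "Course  Description" in line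
--             or "Description:" in line or "Course Description" in line)
--
--
-- def get_course_pre(course_raw):
--     # scan for the first line with a prerequisite marker, stopping at a description line
--     for i, line in enumerate(course_raw):
--         if _desc(line):
--             return ""
--         if "Pre-requisite(s):" in line:
--             block = []
--             for l in course_raw[i:]:
--                 if _desc(l):
--                     break
--                 block.append(l)
--             return "".join(l.replace("Pre-requisite(s):", "") for l in block)
--     return ""
-- ===== Notes on version B (the rewrite author's own statement) =====
-- stated objective: simpler
-- what changed: A's single loop with a mutable start flag and a conditional replace is replaced by an early-return scan to the first prerequisite line (returning '' if a description line comes first) followed by a take-until-description collection with an unconditional replace.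
import Mathlib
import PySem

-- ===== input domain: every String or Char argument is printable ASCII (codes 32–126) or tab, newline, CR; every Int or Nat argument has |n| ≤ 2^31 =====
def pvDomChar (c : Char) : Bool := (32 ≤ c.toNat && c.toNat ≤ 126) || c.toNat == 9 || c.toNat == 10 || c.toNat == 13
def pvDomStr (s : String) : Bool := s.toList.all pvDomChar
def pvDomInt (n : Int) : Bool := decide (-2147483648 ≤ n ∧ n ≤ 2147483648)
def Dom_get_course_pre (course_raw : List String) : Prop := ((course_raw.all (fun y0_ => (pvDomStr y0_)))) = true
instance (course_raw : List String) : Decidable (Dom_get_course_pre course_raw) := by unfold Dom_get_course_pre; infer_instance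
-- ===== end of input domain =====

-- B replaces A's single stateful flag-loop by an early-return scan to the first
-- prerequisite line plus a take-until-description collection (objective: simpler).

-- ===== PORT A =====
-- loop over course_raw with state (buffer, start); break = return buffer
def getCoursePreLoop (rest buffer : List String) (start : Bool) : List String :=
  match rest with
  | [] => buffer
  | i :: tail =>
    let start := if PySem.Str.isIn "Pre-requisite(s):" i then true else start
    if PySem.Str.isIn "Course Description:" i || PySem.Str.isIn "Course  Description" i
        || PySem.Str.isIn "Description:" i || PySem.Str.isIn "Course Description" i then
      buffer
    else
      let buffer :=
        if start then
          if PySem.Str.isIn "Pre-requisite(s):" i then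
            buffer ++ [PySem.Str.replace i "Pre-requisite(s):" ""]
          else buffer ++ [i]
        else buffer
      getCoursePreLoop tail buffer start

def get_course_pre (course_raw : List String) : String :=
  PySem.Str.join "" (getCoursePreLoop course_raw [] false)

-- ===== PORT B =====
-- helper _desc: does the line carry one of the description markers?
def descLine (line : String) : Bool :=
  PySem.Str.isIn "Course Description:" line || PySem.Str.isIn "Course  Description" line
    || PySem.Str.isIn "Description:" line || PySem.Str.isIn "Course Description" line

-- inner loop of B: collect lines until the first description line (break)
def takeUntilDesc (lines : List String) : List String :=
  match lines with
  | [] => []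
  | l :: rest => if descLine l then [] else l :: takeUntilDesc rest

-- outer loop of B: scan to the first prerequisite line (course_raw[i:] = line :: rest)
def get_course_pre_alt (course_raw : List String) : String :=
  match course_raw with
  | [] => ""
  | line :: rest =>
    if descLine line then ""
    else if PySem.Str.isIn "Pre-requisite(s):" line then
      PySem.Str.join ""
        ((takeUntilDesc (line :: rest)).map (fun l => PySem.Str.replace l "Pre-requisite(s):" ""))
    else get_course_pre_alt rest

-- ===== PRECONDITION & SPEC =====
def Spec_get_course_pre (course_raw : List String) (out : String) : Prop := out = get_course_pre_alt course_raw
instance (course_raw : List String) (out : String) : Decidable (Spec_get_course_pre course_raw out) := by unfold Spec_get_course_pre; infer_instance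

-- ===== CLAIM (what is proved, stated in full; the proofs are below) =====
def Claim_equal_get_course_pre : Prop := ∀ (course_raw : List String), Dom_get_course_pre course_raw → Spec_get_course_pre course_raw (get_course_pre course_raw)

-- ===== LEMMAS AND PROOFS =====

-- replace is a no-op on a string that does not contain the (non-empty) pattern
lemma replace_go_noop (old new : List Char) : ∀ (fuel : Nat) (l acc : List Char),
    ¬ old <:+: l → PySem.Chars.replace.go old new fuel l acc = acc.reverse ++ l := by
  intro fuel
  induction fuel with
  | zero => intro l acc _; simp [PySem.Chars.replace.go]
  | succ n ih =>
    intro l acc h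
    match l with
    | [] => simp [PySem.Chars.replace.go]
    | c :: t =>
      have hpre : ¬ old.isPrefixOf (c :: t) = true := by
        intro hp
        exact h (List.IsPrefix.isInfix (List.isPrefixOf_iff_prefix.mp hp))
      have hinf : ¬ old <:+: t := fun hi => h (hi.trans (List.suffix_cons c t).isInfix)
      simp only [PySem.Chars.replace.go, if_neg hpre]
      rw [ih t (c :: acc) hinf]
      simp

lemma replace_noop (s old new : String) (h : PySem.Str.isIn old s = false) :
    PySem.Str.replace s old new = s := by
  have hinf : ¬ old.toList <:+: s.toList := by
    rw [← PySem.Chars.isIn_eq_false_iff]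
    simpa [PySem.Str.isIn] using h
  have hne : old.toList ≠ [] := by
    intro he
    rw [← PySem.Chars.isIn_eq_false_iff, he] at hinf
    simp [PySem.Chars.isIn_nil] at hinf
  rw [PySem.Str.replace, PySem.Chars.replace]
  simp only [List.isEmpty_iff, hne, if_false]
  rw [replace_go_noop old.toList new.toList s.toList.length s.toList [] hinf]
  simp

-- once start = 1, A's loop appends every line (replaced) until a description line
lemma aLoop_true (xs : List String) : ∀ (buf : List String),
    getCoursePreLoop xs buf true
      = buf ++ (takeUntilDesc xs).map (fun l => PySem.Str.replace l "Pre-requisite(s):" "") := by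
  induction xs with
  | nil => intro buf; simp [getCoursePreLoop, takeUntilDesc]
  | cons x rest ih =>
    intro buf
    rw [getCoursePreLoop, takeUntilDesc]
    by_cases hd : descLine x = true
    · rw [descLine] at hd
      rw [if_pos hd]
      rw [descLine, if_pos hd]
      simp
    · rw [descLine] at hd
      rw [if_neg hd]
      rw [descLine, if_neg hd]
      simp only [ite_self]
      by_cases hp : PySem.Str.isIn "Pre-requisite(s):" x = true
      · rw [if_pos hp, ih]
        simp
      · rw [if_neg hp, ih]
        have hx := replace_noop x "Pre-requisite(s):" "" (by simpa using hp)
        simp [hx]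

-- main equivalence
lemma main_equiv (xs : List String) : get_course_pre xs = get_course_pre_alt xs := by
  induction xs with
  | nil => rfl
  | cons x rest ih =>
    rw [get_course_pre, get_course_pre_alt, getCoursePreLoop]
    by_cases hd : descLine x = true
    · have hd' := hd
      rw [descLine] at hd'
      rw [if_pos hd, if_pos hd']
      rfl
    · have hd' := hd
      rw [descLine] at hd'
      rw [if_neg hd, if_neg hd']
      by_cases hp : PySem.Str.isIn "Pre-requisite(s):" x = true
      · rw [if_pos hp]
        rw [if_pos hp, if_pos hp, aLoop_true]
        rw [takeUntilDesc, if_neg hd]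
        simp
      · have hpf : PySem.Str.isIn "Pre-requisite(s):" x = false := by simpa using hp
        simp only [hpf, Bool.false_eq_true, if_false]
        exact ih

-- ===== VERDICT (by name: the statement is the Claim_ definition above) =====
theorem get_course_pre_spec : Claim_equal_get_course_pre := by
  intro course_raw _
  unfold Spec_get_course_pre
  exact main_equiv course_raw
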